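-- pv_equiv track=rewrite | github.com/thirupathireddy665/crossbeam | src/bustle_generated_properties.py | is_one
-- ===== SOURCE A (Python) =====
-- AllTrue = -1
--
-- Mixed = 0
--
-- AllFalse = 1
--
-- def is_one(inputs):
--     is_true_present = False
--     is_false_present = False
--     for program_input in inputs:
--         if program_input == 1:
--             is_true_present = True
--         else:
--             is_false_present = True
--
--     if is_true_present and is_false_present:
--         return Mixed
--     elif is_true_present:
--         return AllTrue
--     else:
--         return AllFalse
-- ===== SOURCE B (Python) =====
-- AllTrue = -1
--
-- Mixed = 0
--
-- AllFalse = 1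
--
-- def is_one(inputs):
--     lst = list(inputs)
--     if not lst:
--         return AllFalse
--     if lst[0] == 1:
--         # pivot is true: mixed iff some later element disagrees, else all true
--         return Mixed if any(x != 1 for x in lst[1:]) else AllTrue
--     else:
--         # pivot is false: mixed iff some later element is 1, else all false
--         return Mixed if any(x == 1 for x in lst[1:]) else AllFalse
-- ===== Notes on version B (the rewrite author's own statement) =====
-- stated objective: alternative
-- what changed: Instead of A's exhaustive two-flag scan, B takes the first element as a pivot: empty list is AllFalse; otherwise it searches the tail for one element disagreeing with the pivot (any, short-circuiting), returning Mixed if found and AllTrue/AllFalse according to the pivot otherwise.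
import Mathlib
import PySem

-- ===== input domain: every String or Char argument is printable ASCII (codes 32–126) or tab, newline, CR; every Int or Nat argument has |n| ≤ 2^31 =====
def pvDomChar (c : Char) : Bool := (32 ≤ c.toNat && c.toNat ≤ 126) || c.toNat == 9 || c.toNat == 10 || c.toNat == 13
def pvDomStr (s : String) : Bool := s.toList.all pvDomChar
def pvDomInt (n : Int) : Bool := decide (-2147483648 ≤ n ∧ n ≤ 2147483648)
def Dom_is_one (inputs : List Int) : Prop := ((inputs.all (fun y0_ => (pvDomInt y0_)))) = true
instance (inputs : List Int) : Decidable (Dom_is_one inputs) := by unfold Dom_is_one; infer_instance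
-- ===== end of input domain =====

-- B uses the first element as a pivot and short-circuits on the first disagreeing tail element.

-- ===== PORT A =====
-- literal transliteration of A's exhaustive two-flag loop
def is_one (inputs : List Int) : Int :=
  let st := inputs.foldl
    (fun (fl : Bool × Bool) program_input =>
      if program_input == 1 then (true, fl.2) else (fl.1, true))
    (false, false)
  if st.1 && st.2 then 0
  else if st.1 then -1
  else 1

-- ===== PORT B =====
-- literal transliteration of B: empty → AllFalse; else pivot on head, scan tail for one disagreement
def is_one_alt (inputs : List Int) : Int :=
  match inputs with
  | [] => 1
  | x :: rest =>
    if x == 1 then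
      if rest.any (fun y => !(y == 1)) then 0 else -1
    else
      if rest.any (fun y => y == 1) then 0 else 1

-- ===== PRECONDITION & SPEC =====
def Spec_is_one (inputs : List Int) (out : Int) : Prop := out = is_one_alt inputs
instance (inputs : List Int) (out : Int) : Decidable (Spec_is_one inputs out) := by unfold Spec_is_one; infer_instance

-- ===== CLAIM =====
def Claim_equal_is_one : Prop := ∀ (inputs : List Int), Dom_is_one inputs → Spec_is_one inputs (is_one inputs)

-- ===== LEMMAS AND PROOFS =====

-- invariant: after A's fold over xs from state (t, f), the flags are
-- (t || xs has a 1, f || xs has a non-1)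
theorem is_one_fold_char (xs : List Int) (t f : Bool) :
    xs.foldl (fun (fl : Bool × Bool) program_input =>
      if program_input == 1 then (true, fl.2) else (fl.1, true)) (t, f)
    = (t || xs.any (fun x => x == 1), f || xs.any (fun x => !(x == 1))) := by
  induction xs generalizing t f with
  | nil => simp
  | cons x xs ih =>
    simp only [List.foldl_cons, List.any_cons]
    by_cases hx : x = 1
    · subst hx
      rw [if_pos (by simp)]
      rw [ih]
      simp
    · rw [if_neg (by simpa using hx)]
      rw [ih]
      have h1 : (x == 1) = false := by simpa using hx
      simp [h1]

-- ===== VERDICT =====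
theorem is_one_spec : Claim_equal_is_one := by
  unfold Claim_equal_is_one
  intro inputs _
  unfold Spec_is_one is_one is_one_alt
  cases inputs with
  | nil => simp
  | cons x rest =>
    simp only [is_one_fold_char, Bool.false_or, List.any_cons]
    by_cases hx : x = 1
    · subst hx
      rcases h : rest.any (fun y => !(y == 1)) with _ | _ <;> simp [h]
    · have h1 : (x == 1) = false := by simpa using hx
      rcases h : rest.any (fun y => y == 1) with _ | _ <;> simp [h, h1]
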